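-- pv_equiv track=rewrite | github.com/anant147/IITD-Col759-Cryptography | Asg2_PublicKeyInfrastructure/sender_encryption.py | get_encrypt_chk
-- ===== SOURCE A (Python) =====
-- chrmap={
-- 	0:'a',1:'b',2:'c',3:'d',
-- 	4:'e',5:'f',6:'g',7:'h',
-- 	8:'i',9:'j',10:'k',11:'l',12:'m',
-- 	13:'n',14:'o',15:'p',16:'q',
-- 	17:'r',18:'s',19:'t',20:'u',21:'v',22:'w',
-- 	23:'x',24:'y',25:'z',26:'0',
-- 	27:'1',28:'2',29:'3',30:'4',31:'5',32:'6',33:'7',34:'8',35:'9'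
-- }
--
-- def get_encrypt_chk(val,bsize):
--     chk=''
--
--     for i in range(bsize,-1,-1):
--         k=val//(36**i)
--         chrval=chrmap[k]
--         val=val%(36**i)
--         chk=chk+chrval
--
--     return chk
-- ===== SOURCE B (Python) =====
-- ALPHA = "abcdefghijklmnopqrstuvwxyz0123456789"
--
-- def get_encrypt_chk(val, bsize):
--     # least-significant-first: peel digits with a running quotient, index into a
--     # flat alphabet string, then reverse; no dict and no 36**i recomputation
--     if bsize < 0:
--         return ''
--     digits = []
--     v = val
--     for _ in range(bsize + 1):
--         digits.append(ALPHA[v % 36])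
--         v //= 36
--     return ''.join(reversed(digits))
-- ===== Notes on version B (the rewrite author's own statement) =====
-- stated objective: faster
-- what changed: B peels base-36 digits least-significant-first with a running quotient (v % 36, v //= 36) and a flat alphabet string indexed by digit, then reverses, instead of A's most-significant-first pass that recomputes 36**i and reduces val modulo it at each step via a dict lookup.
import Mathlib
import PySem

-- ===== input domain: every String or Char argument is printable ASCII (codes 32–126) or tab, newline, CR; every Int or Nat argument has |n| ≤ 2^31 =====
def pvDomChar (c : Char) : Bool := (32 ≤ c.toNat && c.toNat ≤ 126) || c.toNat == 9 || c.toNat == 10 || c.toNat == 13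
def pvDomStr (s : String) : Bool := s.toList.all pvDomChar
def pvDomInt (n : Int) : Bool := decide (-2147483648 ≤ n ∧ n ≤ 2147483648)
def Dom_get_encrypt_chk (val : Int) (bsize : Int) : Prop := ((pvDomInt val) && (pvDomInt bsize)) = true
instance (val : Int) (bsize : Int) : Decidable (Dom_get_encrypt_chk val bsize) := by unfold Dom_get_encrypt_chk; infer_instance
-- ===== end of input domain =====

-- B peels the base-36 digits least-significant-first with a running quotient and a flat
-- alphabet indexed by digit, then reverses — instead of A's MSB-first dict-lookup pass
-- recomputing 36**i each step.

-- ===== PORT A =====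
-- the module-level dict chrmap
def chrmapA : PySem.Dict Int String := PySem.Dict.ofList
  [(0,"a"),(1,"b"),(2,"c"),(3,"d"),(4,"e"),(5,"f"),(6,"g"),(7,"h"),(8,"i"),(9,"j"),
   (10,"k"),(11,"l"),(12,"m"),(13,"n"),(14,"o"),(15,"p"),(16,"q"),(17,"r"),(18,"s"),(19,"t"),
   (20,"u"),(21,"v"),(22,"w"),(23,"x"),(24,"y"),(25,"z"),(26,"0"),(27,"1"),(28,"2"),(29,"3"),
   (30,"4"),(31,"5"),(32,"6"),(33,"7"),(34,"8"),(35,"9")]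

-- one iteration of A's loop body; state = (chk, val); none = a KeyError already happened
def aStep (st : Option (String × Int)) (i : Int) : Option (String × Int) :=
  match st with
  | none => none
  | some (chk, v) =>
    let p : Int := 36 ^ i.toNat   -- 36**i; i ≥ 0 for every i the loop visits, so toNat is exact
    let k := PySem.Int.floordiv v p
    match chrmapA.get? k with
    | none => none                -- chrmap[k] raises KeyError
    | some c => some (chk ++ c, PySem.Int.mod v p)

def get_encrypt_chk (val : Int) (bsize : Int) : String :=
  match (PySem.List.pyRange bsize (-1) (-1)).foldl aStep (some ("", val)) with
  | some (chk, _) => chk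
  | none => ""                    -- unreachable under Pre_ (KeyError)

-- ===== PORT B =====
-- the module-level string ALPHA, as its code points
def alphaB : List Char := "abcdefghijklmnopqrstuvwxyz0123456789".toList

-- Source B's loop, as the obvious structural recursion on the remaining iteration count:
-- emit ALPHA[v % 36] (v % 36 is always in range, so the IndexError default is dead), then v //= 36
def bDigits : Nat → Int → List Char
  | 0, _ => []
  | n+1, v =>
      (PySem.List.pyGet? alphaB (PySem.Int.mod v 36)).getD ' '
        :: bDigits n (PySem.Int.floordiv v 36)

def get_encrypt_chk_alt (val : Int) (bsize : Int) : String :=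
  if bsize < 0 then ""
  else String.ofList ((bDigits (bsize + 1).toNat val).reverse)

-- ===== PRECONDITION & SPEC =====
-- decides v < 36 ^ e by peeling base-36 digits (at most log36 v steps, so it
-- evaluates fast even for huge e); proved equal to v < 36 ^ e in lt36powN_iff below
def lt36powN : Nat → Nat → Bool
  | v, 0 => v < 1
  | v, e+1 => (v < 36) || lt36powN (v / 36) e

-- Pre_ excludes exactly the inputs on which A raises KeyError: bsize ≥ 0 with val
-- negative or ≥ 36^(bsize+1), i.e. too large for bsize+1 base-36 digits (the dict lookup misses).
def Pre_get_encrypt_chk (val : Int) (bsize : Int) : Prop :=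
  bsize < 0 ∨ (0 ≤ val ∧ lt36powN val.toNat (bsize + 1).toNat = true)
instance (val : Int) (bsize : Int) : Decidable (Pre_get_encrypt_chk val bsize) := by
  unfold Pre_get_encrypt_chk; infer_instance

def pvWitness_get_encrypt_chk : Int × Int := (50, 1)

def Spec_get_encrypt_chk (val : Int) (bsize : Int) (out : String) : Prop := out = get_encrypt_chk_alt val bsize
instance (val : Int) (bsize : Int) (out : String) : Decidable (Spec_get_encrypt_chk val bsize out) := by
  unfold Spec_get_encrypt_chk; infer_instance

-- ===== CLAIM (what is proved, stated in full; the proofs are below) =====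
def Claim_equal_get_encrypt_chk : Prop := ∀ (val : Int) (bsize : Int), Dom_get_encrypt_chk val bsize → Pre_get_encrypt_chk val bsize → Spec_get_encrypt_chk val bsize (get_encrypt_chk val bsize)


-- ===== LEMMAS AND PROOFS =====

lemma lt36powN_iff (e : Nat) : ∀ v : Nat, lt36powN v e = true ↔ v < 36 ^ e := by
  induction e with
  | zero => intro v; simp [lt36powN]
  | succ e ih =>
      intro v
      simp only [lt36powN, Bool.or_eq_true, decide_eq_true_eq, ih (v / 36),
        Nat.div_lt_iff_lt_mul (by omega : 0 < 36)]
      constructor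
      · rintro (h | h)
        · calc v < 36 := h
            _ = 36 ^ 1 := (pow_one 36).symm
            _ ≤ 36 ^ (e+1) := Nat.pow_le_pow_right (by omega) (by omega)
        · calc v < 36 ^ e * 36 := h
            _ = 36 ^ (e+1) := by rw [pow_succ]
      · intro h
        right
        calc v < 36 ^ (e+1) := h
          _ = 36 ^ e * 36 := by rw [pow_succ]

-- the digit string for key k (equals chrmap[k] whenever 0 ≤ k < 36)
def dstr (k : Int) : String := (chrmapA.get? k).getD ""

lemma optget {α : Type} (o : Option α) (d : α) (h : o.isSome) : o = some (o.getD d) := by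
  cases o with
  | none => simp at h
  | some v => rfl

lemma chrmap_isSome {k : Int} (h0 : 0 ≤ k) (h36 : k < 36) : (chrmapA.get? k).isSome := by
  interval_cases k <;> decide

lemma chrmap_get_eq {k : Int} (h0 : 0 ≤ k) (h36 : k < 36) :
    chrmapA.get? k = some (dstr k) := optget _ _ (chrmap_isSome h0 h36)

-- join of a digit list is the foldl of appends A performs, started from chk
lemma join_eq_foldl (l : List String) (chk : String) :
    chk ++ String.join l = l.foldl (· ++ ·) chk := by
  induction l generalizing chk with
  | nil => simp [String.join]
  | cons x xs ih =>
      have hj : String.join (x :: xs) = x ++ String.join xs := by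
        simp only [String.join, List.foldl_cons, String.empty_append]
        exact (ih x).symm
      rw [hj, ← String.append_assoc, ih (chk ++ x), List.foldl_cons]

-- least-significant-first digit STRING list of m, n digits
def lsbN : Nat → Nat → List String
  | 0, _ => []
  | n+1, m => dstr (m % 36 : Nat) :: lsbN n (m / 36)

-- most-significant-first digit string list of m, n+1 digits (A's order)
def msbN : Nat → Nat → List String
  | 0, m => [dstr m]
  | n+1, m => dstr ((m / 36 ^ (n+1) : Nat)) :: msbN n (m % 36 ^ (n+1))

lemma msbN_snoc (n : Nat) (m : Nat) :
    msbN (n+1) m = msbN n (m / 36) ++ [dstr (m % 36 : Nat)] := by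
  induction n generalizing m with
  | zero => simp [msbN]
  | succ n ih =>
      have h1 : m / 36 / 36 ^ (n+1) = m / 36 ^ (n+2) := by
        rw [Nat.div_div_eq_div_mul]; ring_nf
      have h2 : m % 36 ^ (n+2) % 36 = m % 36 :=
        Nat.mod_mod_of_dvd m (dvd_pow_self 36 (Nat.succ_ne_zero _))
      have h3 : m % 36 ^ (n+2) / 36 = m / 36 % 36 ^ (n+1) := by
        have := Nat.mod_mul_right_div_self m 36 (36 ^ (n+1))
        rw [show 36 * 36 ^ (n+1) = 36 ^ (n+2) by ring] at this
        exact this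
      calc msbN (n+2) m = dstr ((m / 36 ^ (n+2) : Nat)) :: msbN (n+1) (m % 36 ^ (n+2)) := rfl
        _ = dstr ((m / 36 ^ (n+2) : Nat)) :: (msbN n (m % 36 ^ (n+2) / 36) ++ [dstr ((m % 36 ^ (n+2)) % 36 : Nat)]) := by rw [ih]
        _ = msbN (n+1) (m / 36) ++ [dstr (m % 36 : Nat)] := by
              rw [h2, h3, ← h1]; simp [msbN]

-- reversing the LSB-first string list gives A's MSB-first list
lemma lsbN_reverse (n : Nat) (m : Nat) :
    (lsbN (n+1) m).reverse = msbN n (m % 36 ^ (n+1)) := by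
  induction n generalizing m with
  | zero => simp [lsbN, msbN]
  | succ n ih =>
      have h3 : m % 36 ^ (n+2) / 36 = m / 36 % 36 ^ (n+1) := by
        have := Nat.mod_mul_right_div_self m 36 (36 ^ (n+1))
        rw [show 36 * 36 ^ (n+1) = 36 ^ (n+2) by ring] at this
        exact this
      have h2 : m % 36 ^ (n+2) % 36 = m % 36 :=
        Nat.mod_mod_of_dvd m (dvd_pow_self 36 (Nat.succ_ne_zero _))
      calc (lsbN (n+2) m).reverse
          = (lsbN (n+1) (m / 36)).reverse ++ [dstr (m % 36 : Nat)] := by simp [lsbN]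
        _ = msbN n (m / 36 % 36 ^ (n+1)) ++ [dstr (m % 36 : Nat)] := by rw [ih]
        _ = msbN (n+1) (m % 36 ^ (n+2)) := by rw [msbN_snoc, h3, h2]

-- B's per-digit char agrees with A's per-digit string: dstr j is the singleton of ALPHA[j]
lemma dstr_eq_alpha {j : Nat} (h : j < 36) :
    dstr (j : Int) = String.ofList [(PySem.List.pyGet? alphaB (j : Int)).getD ' '] := by
  interval_cases j <;> decide

-- B's digit list, on a natural, is pointwise the singleton strings of lsbN
lemma bDigits_map (n : Nat) : ∀ m : Nat,
    lsbN n m = (bDigits n (m : Int)).map (fun c => String.ofList [c]) := by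
  induction n with
  | zero => intro m; simp [lsbN, bDigits]
  | succ n ih =>
      intro m
      have hmod : PySem.Int.mod (m : Int) 36 = ((m % 36 : Nat) : Int) := PySem.Int.mod_natCast _ _
      have hdiv : PySem.Int.floordiv (m : Int) 36 = ((m / 36 : Nat) : Int) := PySem.Int.floordiv_natCast _ _
      simp only [lsbN, bDigits, hmod, hdiv, List.map_cons, ← ih (m / 36)]
      rw [dstr_eq_alpha (Nat.mod_lt _ (by omega))]

-- joining singleton strings rebuilds the string
lemma join_singletons (l : List Char) :
    String.join (l.map (fun c => String.ofList [c])) = String.ofList l := by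
  induction l with
  | nil => rfl
  | cons c cs ih =>
      have hj : String.join (String.ofList [c] :: cs.map (fun c => String.ofList [c]))
          = String.ofList [c] ++ String.join (cs.map (fun c => String.ofList [c])) := by
        simp only [String.join, List.foldl_cons, String.empty_append]
        exact (join_eq_foldl _ _).symm
      simp only [List.map_cons, hj, ih]
      exact (String.ofList_append (l₁ := [c]) (l₂ := cs)).symm

-- A's fold over range(n, -1, -1) produces the MSB-first digits when m < 36^(n+1)
lemma afold_char (n : Nat) (m : Nat) (chk : String) (hm : m < 36 ^ (n+1)) :
    ∃ r, (PySem.List.pyRange (n : Int) (-1) (-1)).foldl aStep (some (chk, (m : Int)))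
      = some ((msbN n m).foldl (· ++ ·) chk, r) := by
  induction n generalizing m chk with
  | zero =>
      simp only [Nat.cast_zero]
      rw [PySem.List.pyRange_neg_one_cons (by norm_num : (-1:Int) < 0),
          show (0:Int) - 1 = -1 by norm_num,
          PySem.List.pyRange_neg_one_eq_nil (le_refl (-1)),
          List.foldl_cons, List.foldl_nil]
      have hk : PySem.Int.floordiv (m : Int) 1 = (m : Int) := by
        simpa using PySem.Int.floordiv_natCast m 1
      have hget := chrmap_get_eq (k := (m : Int)) (by positivity)
        (by exact_mod_cast (by simpa using hm : m < 36))
      refine ⟨PySem.Int.mod (m : Int) 1, ?_⟩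
      show aStep (some (chk, (m : Int))) 0 = _
      unfold aStep
      simp only [show ((0:Int).toNat) = 0 from rfl, pow_zero, msbN, List.foldl_cons, List.foldl_nil]
      rw [hk, hget]
  | succ n ih =>
      rw [PySem.List.pyRange_neg_one_cons (by push_cast; omega : (-1:Int) < (((n+1:Nat)):Int)),
          show (((n+1:Nat)):Int) - 1 = ((n:Nat):Int) by push_cast; ring,
          List.foldl_cons]
      have htn : (((n+1:Nat)):Int).toNat = n + 1 := by simp
      have hpow : ((36:Int) ^ (n+1)) = ((36 ^ (n+1) : Nat) : Int) := by push_cast; ring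
      have hdiv : PySem.Int.floordiv (m : Int) ((36 ^ (n+1) : Nat) : Int)
          = ((m / 36 ^ (n+1) : Nat) : Int) := PySem.Int.floordiv_natCast _ _
      have hmod : PySem.Int.mod (m : Int) ((36 ^ (n+1) : Nat) : Int)
          = ((m % 36 ^ (n+1) : Nat) : Int) := PySem.Int.mod_natCast _ _
      have hklt : m / 36 ^ (n+1) < 36 :=
        Nat.div_lt_of_lt_mul (by calc m < 36 ^ (n+2) := hm
                                   _ = 36 ^ (n+1) * 36 := by ring)
      have hget := chrmap_get_eq (k := ((m / 36 ^ (n+1) : Nat) : Int)) (by positivity)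
        (by exact_mod_cast hklt)
      have hstep : aStep (some (chk, (m : Int))) (((n+1:Nat)):Int)
          = some (chk ++ dstr ((m / 36 ^ (n+1) : Nat)), ((m % 36 ^ (n+1) : Nat) : Int)) := by
        unfold aStep
        simp only [htn]
        rw [hpow, hdiv, hmod, hget]
      obtain ⟨r, hr⟩ := ih (m % 36 ^ (n+1)) (chk ++ dstr ((m / 36 ^ (n+1) : Nat)))
        (Nat.mod_lt _ (by positivity))
      refine ⟨r, ?_⟩
      rw [hstep, hr]
      simp only [msbN, List.foldl_cons]

-- ===== VERDICT (by name: the statement is the Claim_ definition above) =====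
theorem get_encrypt_chk_spec : Claim_equal_get_encrypt_chk := by
  intro val bsize _ hpre
  unfold Spec_get_encrypt_chk get_encrypt_chk get_encrypt_chk_alt
  rcases hpre with hneg | ⟨h0, hlt⟩
  · rw [PySem.List.pyRange_neg_one_eq_nil (by omega : bsize ≤ -1)]
    simp [hneg]
  · by_cases hneg2 : bsize < 0
    · rw [PySem.List.pyRange_neg_one_eq_nil (by omega : bsize ≤ -1), if_pos hneg2]
      simp
    · obtain ⟨n, rfl⟩ : ∃ n : Nat, bsize = (n : Int) := ⟨bsize.toNat, by omega⟩
      obtain ⟨m, rfl⟩ : ∃ m : Nat, val = (m : Int) := ⟨val.toNat, by omega⟩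
      have htn : ((n : Int) + 1).toNat = n + 1 := by omega
      rw [htn] at hlt
      have hm : m < 36 ^ (n + 1) := by
        have := (lt36powN_iff (n + 1) ((m : Int)).toNat).mp hlt
        simpa using this
      obtain ⟨r, hr⟩ := afold_char n m "" hm
      rw [if_neg hneg2, htn, hr]
      calc (msbN n m).foldl (· ++ ·) ""
          = String.join (msbN n m) := by rw [← join_eq_foldl]; simp
        _ = String.join ((lsbN (n+1) m).reverse) := by
              rw [lsbN_reverse, Nat.mod_eq_of_lt hm]
        _ = String.join (((bDigits (n+1) (m : Int)).reverse).map (fun c => String.ofList [c])) := by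
              rw [bDigits_map, List.map_reverse]
        _ = String.ofList ((bDigits (n+1) (m : Int)).reverse) := join_singletons _
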